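-- pv_equiv track=rewrite | github.com/merledu/Pyverilog-sv2v | systemverilog2verilog/systemverilog2verilog/src/sv2v.py | get_in_bracket_signals
-- ===== SOURCE A (Python) =====
-- def get_in_bracket_signals(line):
--     in_bracket_signals = []
--     words = line.replace(';', '').split(')')
--     for word in words:
--         in_bracket = word[word.rfind('(') + 1:].strip()
--         if in_bracket:
--             in_bracket_signals.append(word[word.rfind('(') + 1:].strip())
--     return in_bracket_signals
-- ===== SOURCE B (Python) =====
-- def get_in_bracket_signals(line):
--     in_bracket_signals = []
--     buf = ''
--     for ch in line.replace(';', ''):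
--         if ch == '(':
--             buf = ''
--         elif ch == ')':
--             s = buf.strip()
--             if s:
--                 in_bracket_signals.append(s)
--             buf = ''
--         else:
--             buf += ch
--     s = buf.strip()
--     if s:
--         in_bracket_signals.append(s)
--     return in_bracket_signals
-- ===== Notes on version B (the rewrite author's own statement) =====
-- stated objective: alternative
-- what changed: Replaces the two-phase split(')') + per-segment rfind('(') extraction by a single left-to-right character scan with one buffer that is reset on '(' and flushed (stripped, kept if non-empty) on ')' and at end of input.
import Mathlib
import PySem

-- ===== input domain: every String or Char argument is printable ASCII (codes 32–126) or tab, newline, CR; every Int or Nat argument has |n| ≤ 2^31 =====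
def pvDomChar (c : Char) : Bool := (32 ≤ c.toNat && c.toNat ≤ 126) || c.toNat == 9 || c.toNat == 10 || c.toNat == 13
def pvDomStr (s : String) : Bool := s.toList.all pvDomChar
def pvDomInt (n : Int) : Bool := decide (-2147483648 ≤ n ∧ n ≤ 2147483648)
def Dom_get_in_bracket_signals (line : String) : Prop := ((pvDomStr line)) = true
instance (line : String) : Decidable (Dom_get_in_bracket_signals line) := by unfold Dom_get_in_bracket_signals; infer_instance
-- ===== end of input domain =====

-- B replaces A's split(')') + rfind('(') two-phase extraction by a single left-to-right
-- scan with a buffer reset on '(' and flushed on ')' (objective: alternative decomposition).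

-- ===== PORT A =====
def get_in_bracket_signals (line : String) : List String :=
  let words := PySem.Chars.splitOn (PySem.Str.replace line ";" "").toList [')']
  words.foldl (fun acc w =>
    let in_bracket := PySem.Chars.strip
      (PySem.Chars.slice w (some (PySem.Chars.rfind w ['('] + 1)) none)
    if in_bracket ≠ [] then acc ++ [String.ofList in_bracket] else acc) []

-- ===== PORT B =====
-- single pass: buffer cleared at '(', flushed (stripped, kept if non-empty) at ')'
def altStep (st : List Char × List String) (c : Char) : List Char × List String :=
  if c = '(' then ([], st.2)
  else if c = ')' then
    let s := PySem.Chars.strip st.1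
    ([], st.2 ++ (if s ≠ [] then [String.ofList s] else []))
  else (st.1 ++ [c], st.2)

def get_in_bracket_signals_alt (line : String) : List String :=
  let st := (PySem.Str.replace line ";" "").toList.foldl altStep ([], [])
  let s := PySem.Chars.strip st.1
  st.2 ++ (if s ≠ [] then [String.ofList s] else [])

-- ===== PRECONDITION & SPEC =====
def Spec_get_in_bracket_signals (line : String) (out : List String) : Prop := out = get_in_bracket_signals_alt line
instance (line : String) (out : List String) : Decidable (Spec_get_in_bracket_signals line out) := by unfold Spec_get_in_bracket_signals; infer_instance

-- ===== CLAIM (what is proved, stated in full; the proofs are below) =====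
def Claim_equal_get_in_bracket_signals : Prop := ∀ (line : String), Dom_get_in_bracket_signals line → Spec_get_in_bracket_signals line (get_in_bracket_signals line)

-- ===== LEMMAS AND PROOFS =====

-- small-step equations for the fuel-based PySem primitives
lemma rfind_go_zero (s sub : List Char) :
    PySem.Chars.rfind.go s sub 0 = if sub.isPrefixOf s then 0 else -1 := by
  rw [PySem.Chars.rfind.go.eq_def]

lemma rfind_go_succ (s sub : List Char) (j : Nat) :
    PySem.Chars.rfind.go s sub (j+1)
      = if sub.isPrefixOf (s.drop (j+1)) then ((j:Int)+1) else PySem.Chars.rfind.go s sub j := by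
  rw [PySem.Chars.rfind.go.eq_def]; simp

lemma splitOn_go_nil (sep : List Char) (fuel : Nat) (cur : List Char) (acc : List (List Char)) :
    PySem.Chars.splitOn.go sep fuel [] cur acc = acc.reverse ++ [cur.reverse] := by
  cases fuel <;> (rw [PySem.Chars.splitOn.go.eq_def]; simp)

lemma splitOn_go_succ (sep : List Char) (fuel : Nat) (c : Char) (rest cur : List Char) (acc : List (List Char)) :
    PySem.Chars.splitOn.go sep (fuel+1) (c :: rest) cur acc
      = if sep.isPrefixOf (c :: rest)
        then PySem.Chars.splitOn.go sep fuel (List.drop sep.length (c :: rest)) [] (cur.reverse :: acc)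
        else PySem.Chars.splitOn.go sep fuel rest (c :: cur) acc := by
  rw [PySem.Chars.splitOn.go.eq_def]

-- reference split of a char list at ')' : (first segment, remaining segments)
def spH : List Char → List Char × List (List Char)
  | [] => ([], [])
  | c :: t => if c = ')' then ([], (spH t).1 :: (spH t).2)
              else (c :: (spH t).1, (spH t).2)

-- B's buffer after scanning a ')'-free segment
def bufEnd (buf : List Char) (w : List Char) : List Char :=
  w.foldl (fun b c => if c = '(' then [] else b ++ [c]) buf

def emitSeg (buf : List Char) (w : List Char) : List String :=
  if PySem.Chars.strip (bufEnd buf w) ≠ []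
  then [String.ofList (PySem.Chars.strip (bufEnd buf w))] else []

lemma splitOn_go_eq (l : List Char) : ∀ (fuel : Nat) (cur : List Char) (acc : List (List Char)),
    l.length ≤ fuel →
    PySem.Chars.splitOn.go [')'] fuel l cur acc
      = acc.reverse ++ (cur.reverse ++ (spH l).1) :: (spH l).2 := by
  induction l with
  | nil =>
      intro fuel cur acc _
      rw [splitOn_go_nil]; simp [spH]
  | cons c t ih =>
      intro fuel cur acc h
      cases fuel with
      | zero => simp at h
      | succ f =>
        rw [splitOn_go_succ]
        by_cases hc : c = ')'
        · subst hc
          rw [if_pos (by simp [List.isPrefixOf])]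
          have : List.drop [')'].length (')' :: t) = t := rfl
          rw [this, ih f [] (cur.reverse :: acc) (by simp at h; omega)]
          simp [spH]
        · rw [if_neg (by simp [List.isPrefixOf]; exact fun h' => hc h'.symm)]
          rw [ih f (c :: cur) acc (by simp at h; omega)]
          simp [spH, hc]

lemma splitOn_eq (cs : List Char) :
    PySem.Chars.splitOn cs [')'] = ((spH cs).1) :: (spH cs).2 := by
  rw [PySem.Chars.splitOn, splitOn_go_eq cs (cs.length + 1) [] [] (by omega)]
  simp

lemma rfind_go_append (w : List Char) (d c : Char) :
    ∀ j : Nat, j < w.length →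
    PySem.Chars.rfind.go (w ++ [d]) [c] j = PySem.Chars.rfind.go w [c] j := by
  intro j
  induction j with
  | zero =>
      intro h
      cases w with
      | nil => simp at h
      | cons x xs => rw [rfind_go_zero, rfind_go_zero]; simp [List.isPrefixOf]
  | succ j ih =>
      intro h
      rw [rfind_go_succ, rfind_go_succ]
      have hd : (w ++ [d]).drop (j + 1) = w.drop (j + 1) ++ [d] := by
        rw [List.drop_append_of_le_length (by omega)]
      rw [hd]
      have hne : w.drop (j + 1) ≠ [] := by
        intro hnil
        have := List.length_drop (l := w) (i := j + 1)
        rw [hnil] at this; simp at this; omega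
      obtain ⟨x, xs, hx⟩ := List.exists_cons_of_ne_nil hne
      rw [hx]
      simp only [List.cons_append, List.isPrefixOf, Bool.and_true]
      rw [ih (by omega)]

lemma rfind_nil (c : Char) : PySem.Chars.rfind [] [c] = -1 := by
  rw [PySem.Chars.rfind]
  simp only [List.length_nil]
  rw [rfind_go_zero]; simp [List.isPrefixOf]

lemma rfind_append (w : List Char) (d c : Char) :
    PySem.Chars.rfind (w ++ [d]) [c]
      = if d = c then (w.length : Int) else PySem.Chars.rfind w [c] := by
  rw [PySem.Chars.rfind]
  simp only [List.length_append, List.length_cons, List.length_nil, Nat.zero_add]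
  rw [rfind_go_succ]
  rw [if_neg (by simp [List.drop_eq_nil_of_le])]
  cases w with
  | nil =>
      simp only [List.length_nil, List.nil_append]
      rw [rfind_go_zero, rfind_nil]
      simp only [List.isPrefixOf, Bool.and_true]
      by_cases hdc : d = c
      · subst hdc; simp
      · rw [if_neg (by simp [Ne.symm hdc]), if_neg hdc]
  | cons x xs =>
      simp only [List.length_cons]
      rw [rfind_go_succ]
      have h2 : ((x :: xs) ++ [d]).drop (xs.length + 1) = [d] := by simp
      rw [h2]
      simp only [List.isPrefixOf, Bool.and_true]
      by_cases hdc : d = c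
      · subst hdc; simp
      · rw [if_neg (by simp [Ne.symm hdc]), if_neg hdc]
        rw [rfind_go_append (x :: xs) d c xs.length (by simp)]
        rw [PySem.Chars.rfind]
        simp only [List.length_cons]
        rw [rfind_go_succ]
        rw [if_neg (by simp [List.drop_eq_nil_of_le])]

lemma rfind_bounds (w : List Char) (c : Char) :
    -1 ≤ PySem.Chars.rfind w [c] ∧ PySem.Chars.rfind w [c] < w.length := by
  induction w using List.reverseRecOn with
  | nil => rw [rfind_nil]; simp
  | append_singleton w d ih =>
      rw [rfind_append]
      by_cases hdc : d = c
      · simp [hdc]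
      · rw [if_neg hdc]
        simp only [List.length_append, List.length_cons, List.length_nil]
        constructor
        · exact ih.1
        · have := ih.2; push_cast at this ⊢; omega

-- A's per-word extraction equals B's buffer computation
lemma slice_rfind_eq_bufEnd (w : List Char) :
    PySem.List.slice w (some (PySem.Chars.rfind w ['('] + 1)) none = bufEnd [] w := by
  induction w using List.reverseRecOn with
  | nil =>
      rw [rfind_nil]
      norm_num
      simp [bufEnd]
  | append_singleton w d ih =>
      have hb := rfind_bounds w '('
      rw [rfind_append]
      by_cases hd : d = '('
      · subst hd
        rw [if_pos rfl]
        rw [PySem.List.slice_from _ (a := (w.length : Int) + 1) (by positivity)]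
        have h1 : ((w.length : Int) + 1).toNat = w.length + 1 := by omega
        rw [h1, List.drop_eq_nil_of_le (by simp)]
        simp [bufEnd, List.foldl_append]
      · rw [if_neg hd]
        rw [PySem.List.slice_from _ (a := PySem.Chars.rfind w ['('] + 1) (by omega)] at ih ⊢
        rw [List.drop_append_of_le_length (by omega), ih]
        simp [bufEnd, List.foldl_append, hd]

def finishB (st : List Char × List String) : List String :=
  st.2 ++ (if PySem.Chars.strip st.1 ≠ [] then [String.ofList (PySem.Chars.strip st.1)] else [])

-- B's scan over a whole char list, decomposed along spH
lemma scan_eq (cs : List Char) : ∀ (buf : List Char) (acc : List String),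
    finishB (cs.foldl altStep (buf, acc))
      = acc ++ emitSeg buf (spH cs).1 ++ ((spH cs).2).flatMap (emitSeg []) := by
  induction cs with
  | nil => intro buf acc; simp [finishB, spH, emitSeg, bufEnd]
  | cons c t ih =>
      intro buf acc
      simp only [List.foldl_cons]
      by_cases h1 : c = '('
      · subst h1
        rw [show altStep (buf, acc) '(' = ([], acc) from by simp [altStep]]
        rw [ih [] acc]
        have hs : spH ('(' :: t) = ('(' :: (spH t).1, (spH t).2) := by simp [spH]
        rw [hs]
        have : ∀ w, bufEnd buf ('(' :: w) = bufEnd [] w := by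
          intro w; simp [bufEnd]
        simp [emitSeg, this]
      · by_cases h2 : c = ')'
        · subst h2
          rw [show altStep (buf, acc) ')'
                = ([], acc ++ (if PySem.Chars.strip buf ≠ []
                    then [String.ofList (PySem.Chars.strip buf)] else [])) from by simp [altStep]]
          rw [ih [] _]
          have hs : spH (')' :: t) = ([], (spH t).1 :: (spH t).2) := by simp [spH]
          rw [hs]
          simp [emitSeg, bufEnd]
        · rw [show altStep (buf, acc) c = (buf ++ [c], acc) from by simp [altStep, h1, h2]]
          rw [ih (buf ++ [c]) acc]
          have hs : spH (c :: t) = (c :: (spH t).1, (spH t).2) := by simp [spH, h2]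
          rw [hs]
          have hbe : ∀ w, bufEnd buf (c :: w) = bufEnd (buf ++ [c]) w := by
            intro w; simp [bufEnd, h1]
          simp [emitSeg, hbe]

-- A's fold over the word list as a flatMap
lemma foldA_eq (ws : List (List Char)) : ∀ (acc : List String),
    ws.foldl (fun acc w =>
      let in_bracket := PySem.Chars.strip
        (PySem.Chars.slice w (some (PySem.Chars.rfind w ['('] + 1)) none)
      if in_bracket ≠ [] then acc ++ [String.ofList in_bracket] else acc) acc
    = acc ++ ws.flatMap (emitSeg []) := by
  induction ws with
  | nil => intro acc; simp
  | cons w ws ih =>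
      intro acc
      simp only [List.foldl_cons]
      rw [ih]
      have hw : PySem.Chars.strip (PySem.Chars.slice w (some (PySem.Chars.rfind w ['('] + 1)) none)
          = PySem.Chars.strip (bufEnd [] w) := by
        rw [PySem.Chars.slice_eq_listSlice, slice_rfind_eq_bufEnd]
      simp only [hw, List.flatMap_cons, emitSeg]
      by_cases h : PySem.Chars.strip (bufEnd [] w) ≠ []
      · simp [h]
      · simp [h]

-- ===== VERDICT (by name: the statement is the Claim_ definition above) =====
theorem get_in_bracket_signals_spec : Claim_equal_get_in_bracket_signals := by
  intro line _
  unfold Spec_get_in_bracket_signals get_in_bracket_signals get_in_bracket_signals_alt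
  rw [splitOn_eq, foldA_eq]
  have := scan_eq (PySem.Str.replace line ";" "").toList [] []
  simp only [finishB] at this
  simp only [this]
  simp [emitSeg]
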